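-- pv_equiv track=rewrite | github.com/dynm/pico-flexray | flexray_stream_recorder.py | calculate_flexray_header_crc
-- ===== SOURCE A (Python) =====
-- def calculate_flexray_header_crc(frame):
--     """
--     Calculates the FlexRay header CRC based on the C implementation.
--     The frame parameter is a dictionary-like object with keys:
--     'indicators', 'frame_id', 'payload_length_words'.
--     """
--     data_word = 0
--     data_word |= int(frame['indicators']) << 19
--     data_word |= frame['frame_id'] << 7
--     data_word |= frame['payload_length_words']
--
--     crc = 0x1A
--     poly = 0x385
--
--     for i in range(19, -1, -1):
--         data_bit = (data_word >> i) & 1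
--         crc_msb = (crc >> 10) & 1
--
--         crc <<= 1
--         if (data_bit ^ crc_msb):
--             crc ^= poly
--
--     return crc & 0x7FF
-- ===== SOURCE B (Python) =====
-- # Nibble-table FlexRay header CRC: 16-entry table of 11-bit CRC contributions for
-- # poly 0x385, consuming the 20-bit word in 5 nibbles instead of 20 bit steps.
-- # Table entry t = CRC register after 4 shift/xor steps starting from t << 7 (zero data).
-- _CRC_TABLE = (0, 901, 1802, 1167, 1425, 1556, 667, 286,
--               167, 802, 1965, 1064, 1334, 1715, 572, 441)
--
-- def calculate_flexray_header_crc(frame):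
--     data_word = (int(frame['indicators']) << 19) | (frame['frame_id'] << 7) | frame['payload_length_words']
--     crc = 0x1A
--     for shift in (16, 12, 8, 4, 0):
--         nibble = (data_word >> shift) & 0xF
--         crc = ((crc << 4) ^ _CRC_TABLE[((crc >> 7) & 0xF) ^ nibble]) & 0x7FF
--     return crc
-- ===== Notes on version B (the rewrite author's own statement) =====
-- stated objective: faster
-- what changed: Replaces the 20-iteration per-bit conditional-XOR CRC loop by a 5-iteration nibble loop driven by a precomputed 16-entry table of CRC contributions, keeping the register masked to 11 bits.
import Mathlib
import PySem

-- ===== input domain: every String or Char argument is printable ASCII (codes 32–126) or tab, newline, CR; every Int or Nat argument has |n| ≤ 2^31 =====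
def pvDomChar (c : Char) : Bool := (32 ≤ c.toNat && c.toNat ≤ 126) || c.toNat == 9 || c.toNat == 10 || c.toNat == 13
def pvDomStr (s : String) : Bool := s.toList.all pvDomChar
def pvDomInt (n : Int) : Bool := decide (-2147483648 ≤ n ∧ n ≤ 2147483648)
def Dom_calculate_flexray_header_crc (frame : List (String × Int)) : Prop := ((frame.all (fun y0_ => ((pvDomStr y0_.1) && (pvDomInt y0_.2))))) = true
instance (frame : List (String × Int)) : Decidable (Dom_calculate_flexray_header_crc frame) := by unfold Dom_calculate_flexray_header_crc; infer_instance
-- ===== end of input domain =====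

-- B replaces A's 20-iteration per-bit conditional-XOR CRC loop by a 5-iteration nibble
-- loop over a precomputed 16-entry table (objective: faster by a constant factor).

-- ===== PORT A =====
-- loop body of A's 'for i in range(19, -1, -1)' (i is always ≥ 0 there, so i.toNat is exact)
def aStep (data_word crc i : Int) : Int :=
  let data_bit := PySem.Int.band (data_word >>> i.toNat) 1
  let crc_msb := PySem.Int.band (crc >>> (10:Nat)) 1
  let crc2 := crc <<< (1:Nat)
  if PySem.Int.bxor data_bit crc_msb ≠ 0 then PySem.Int.bxor crc2 901 else crc2

def calculate_flexray_header_crc (frame : List (String × Int)) : Int :=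
  let d := PySem.Dict.ofList frame
  -- frame['…'] raises KeyError when a key is missing: excluded by Pre_
  match d.get? "indicators", d.get? "frame_id", d.get? "payload_length_words" with
  | some ind, some fid, some plw =>
    -- int(frame['indicators']) is the identity on an int value
    let dw := PySem.Int.bor 0 (ind <<< (19:Nat))
    let dw := PySem.Int.bor dw (fid <<< (7:Nat))
    let dw := PySem.Int.bor dw plw
    let crc := (PySem.List.pyRange 19 (-1) (-1)).foldl (aStep dw) 26
    PySem.Int.band crc 2047
  | _, _, _ => 0

-- ===== PORT B =====
def bTable : List Int := [0, 901, 1802, 1167, 1425, 1556, 667, 286, 167, 802, 1965, 1064, 1334, 1715, 572, 441]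

-- loop body of B's 'for shift in (16, 12, 8, 4, 0)'
def bStep (data_word crc : Int) (shift : Nat) : Int :=
  let nibble := PySem.Int.band (data_word >>> shift) 15
  PySem.Int.band
    (PySem.Int.bxor (crc <<< (4:Nat))
      (PySem.List.pyGetD bTable (PySem.Int.bxor (PySem.Int.band (crc >>> (7:Nat)) 15) nibble) 0))
    2047

def calculate_flexray_header_crc_alt (frame : List (String × Int)) : Int :=
  let d := PySem.Dict.ofList frame
  match d.get? "indicators" with
  | none => 0
  | some ind =>
    match d.get? "frame_id" with
    | none => 0
    | some fid =>
      match d.get? "payload_length_words" with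
      | none => 0
      | some plw =>
        let dw := PySem.Int.bor (PySem.Int.bor (ind <<< (19:Nat)) (fid <<< (7:Nat))) plw
        ([16, 12, 8, 4, 0] : List Nat).foldl (bStep dw) 26

-- ===== PRECONDITION & SPEC =====
-- Pre_ excludes exactly the frames missing one of the three keys, on which A raises KeyError.
def Pre_calculate_flexray_header_crc (frame : List (String × Int)) : Prop :=
  (PySem.Dict.ofList frame).contains "indicators" = true ∧
  (PySem.Dict.ofList frame).contains "frame_id" = true ∧
  (PySem.Dict.ofList frame).contains "payload_length_words" = true
instance (frame : List (String × Int)) : Decidable (Pre_calculate_flexray_header_crc frame) := by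
  unfold Pre_calculate_flexray_header_crc; infer_instance

def pvWitness_calculate_flexray_header_crc : (List (String × Int)) :=
  [("indicators", 1), ("frame_id", 37), ("payload_length_words", 8)]

def Spec_calculate_flexray_header_crc (frame : List (String × Int)) (out : Int) : Prop := out = calculate_flexray_header_crc_alt frame
instance (frame : List (String × Int)) (out : Int) : Decidable (Spec_calculate_flexray_header_crc frame out) := by unfold Spec_calculate_flexray_header_crc; infer_instance

-- ===== CLAIM (what is proved, stated in full; the proofs are below) =====
def Claim_equal_calculate_flexray_header_crc : Prop := ∀ (frame : List (String × Int)), Dom_calculate_flexray_header_crc frame → Pre_calculate_flexray_header_crc frame → Spec_calculate_flexray_header_crc frame (calculate_flexray_header_crc frame)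

-- ===== LEMMAS AND PROOFS =====

-- Nat-level mirrors of the two loop bodies
def stepAN (c b : Nat) : Nat :=
  let m := (c >>> 10) &&& 1
  let c2 := c <<< 1
  if b ^^^ m ≠ 0 then c2 ^^^ 901 else c2

def tblN : Nat → Nat := fun t =>
  [0, 901, 1802, 1167, 1425, 1556, 667, 286, 167, 802, 1965, 1064, 1334, 1715, 572, 441].getD t 0

def stepBN (c t : Nat) : Nat := ((c <<< 4) ^^^ tblN (((c >>> 7) &&& 15) ^^^ t)) &&& 2047

-- four successive bit steps of A, fed with the four bits of a nibble t
def fourN (c t : Nat) : Nat :=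
  stepAN (stepAN (stepAN (stepAN c ((t >>> 3) &&& 1)) ((t >>> 2) &&& 1)) ((t >>> 1) &&& 1)) ((t >>> 0) &&& 1)

-- low 20 bits of an Int, as a Nat
def n20 (x : Int) : Nat := (x % 1048576).toNat

-- ---- Int bit-extraction bridges ----

theorem band15_eq_mod (y : Int) : PySem.Int.band y 15 = y % 16 := by
  unfold PySem.Int.band
  rcases (show 0 ≤ y ∨ y < 0 by omega) with hy | hy
  · rw [if_pos hy, if_pos (by norm_num)]
    have h : y.toNat &&& (15:Int).toNat = y.toNat % 16 := by
      have := Nat.and_two_pow_sub_one_eq_mod y.toNat 4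
      norm_num at this ⊢; exact this
    rw [h]; omega
  · rw [if_neg (by omega), if_pos (by norm_num)]
    have h : (15:Int).toNat &&& (-y - 1).toNat = (-y - 1).toNat % 16 := by
      have := Nat.and_two_pow_sub_one_eq_mod (-y - 1).toNat 4
      norm_num at this ⊢; rw [Nat.and_comm]; exact this
    rw [h]; omega

theorem low_div_mod (x : Int) (k j : Nat) (h : k + j ≤ 20) :
    (x / 2 ^ k) % 2 ^ j = ((x % 1048576) / 2 ^ k) % 2 ^ j := by
  have hq := Int.emod_add_mul_ediv x 1048576
  set r := x % 1048576 with hr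
  set q := x / 1048576 with hqd
  have hx : x = r + 2 ^ k * (2 ^ (20 - k) * q) := by
    have : (2:Int) ^ k * 2 ^ (20 - k) = 1048576 := by
      rw [← pow_add, show k + (20 - k) = 20 by omega]; norm_num
    rw [← mul_assoc, this]; omega
  have hdiv : x / 2 ^ k = r / 2 ^ k + 2 ^ (20 - k) * q := by
    rw [hx, Int.add_mul_ediv_left _ _ (by positivity)]
  rw [hdiv]
  have hsplit : (2:Int) ^ (20 - k) * q = 2 ^ j * (2 ^ (20 - k - j) * q) := by
    rw [← mul_assoc, ← pow_add, show j + (20 - k - j) = 20 - k by omega]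
  rw [hsplit, Int.add_mul_emod_self_left]

theorem cast_low (x : Int) (k j : Nat) (h : k + j ≤ 20) :
    (x / 2 ^ k) % 2 ^ j = (((n20 x / 2 ^ k) % 2 ^ j : Nat) : Int) := by
  rw [low_div_mod x k j h]
  have h0 : (0:Int) ≤ x % 1048576 := Int.emod_nonneg x (by norm_num)
  have hr : x % 1048576 = ((n20 x : Nat) : Int) := by unfold n20; omega
  rw [hr]
  push_cast
  rfl

theorem bit_bridge (x : Int) (k : Nat) (hk : k < 20) :
    PySem.Int.band (x >>> k) 1 = ((((n20 x) >>> k) &&& 1 : Nat) : Int) := by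
  rw [PySem.Int.band_one, PySem.Int.mod_eq_emod_of_pos (by norm_num),
    Int.shiftRight_eq_div_pow, Nat.shiftRight_eq_div_pow, Nat.and_one_is_mod]
  have := cast_low x k 1 (by omega)
  norm_num at this ⊢
  exact this

theorem nib_bridge (x : Int) (s : Nat) (hs : s + 4 ≤ 20) :
    PySem.Int.band (x >>> s) 15 = ((((n20 x) >>> s) &&& 15 : Nat) : Int) := by
  rw [band15_eq_mod, Int.shiftRight_eq_div_pow, Nat.shiftRight_eq_div_pow]
  have h15 : ((n20 x) / 2 ^ s) &&& 15 = ((n20 x) / 2 ^ s) % 16 := by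
    have := Nat.and_two_pow_sub_one_eq_mod ((n20 x) / 2 ^ s) 4
    norm_num at this; exact this
  rw [h15]
  have := cast_low x s 4 (by omega)
  norm_num at this ⊢
  exact this

theorem tbl_bridge (n : Nat) : bTable.getD n 0 = ((tblN n : Nat) : Int) := by
  by_cases h : n < 16
  · unfold bTable tblN; interval_cases n <;> rfl
  · unfold bTable tblN
    rw [List.getD_eq_default, List.getD_eq_default] <;> simp <;> omega

-- ---- per-step bridges ----

theorem aStep_nat (x : Int) (c k : Nat) (hk : k < 20) :
    aStep x (c : Int) ((k : Nat) : Int) = ((stepAN c (((n20 x) >>> k) &&& 1) : Nat) : Int) := by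
  unfold aStep stepAN
  dsimp only
  rw [Int.toNat_natCast, bit_bridge x k hk]
  have hmsb : PySem.Int.band ((c : Int) >>> (10:Nat)) 1 = (((c >>> 10) &&& 1 : Nat) : Int) := by
    rw [show ((c : Int) >>> (10:Nat)) = (((c >>> 10 : Nat) : Nat) : Int) from rfl,
      show (1:Int) = ((1:Nat):Int) from rfl, PySem.Int.band_natCast]
  rw [hmsb]
  rw [show ((c : Int) <<< (1:Nat)) = (((c <<< 1 : Nat)) : Int) from rfl]
  rw [PySem.Int.bxor_natCast]
  by_cases hcond : ((n20 x >>> k) &&& 1) ^^^ ((c >>> 10) &&& 1) ≠ 0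
  · rw [if_pos (by exact_mod_cast hcond), if_pos hcond,
      show (901:Int) = ((901:Nat):Int) from rfl, PySem.Int.bxor_natCast]
  · rw [if_neg (by simpa using hcond), if_neg hcond]

theorem bStep_nat (x : Int) (c s : Nat) (hs : s + 4 ≤ 20) :
    bStep x (c : Int) s = ((stepBN c (((n20 x) >>> s) &&& 15) : Nat) : Int) := by
  unfold bStep stepBN
  dsimp only
  rw [nib_bridge x s hs]
  rw [show PySem.Int.band ((c : Int) >>> (7:Nat)) 15 = (((c >>> 7) &&& 15 : Nat) : Int) by
    rw [show ((c : Int) >>> (7:Nat)) = (((c >>> 7 : Nat)) : Int) from rfl,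
      show (15:Int) = ((15:Nat):Int) from rfl, PySem.Int.band_natCast]]
  rw [PySem.Int.bxor_natCast, PySem.List.pyGetD_natCast, tbl_bridge]
  rw [show ((c : Int) <<< (4:Nat)) = (((c <<< 4 : Nat)) : Int) from rfl, PySem.Int.bxor_natCast,
    show (2047:Int) = ((2047:Nat):Int) from rfl, PySem.Int.band_natCast]

theorem foldA_bridge (x : Int) (l : List Nat) (hl : ∀ k ∈ l, k < 20) (c : Nat) :
    (l.map (fun k : Nat => (k : Int))).foldl (aStep x) (c : Int)
      = ((l.foldl (fun c k => stepAN c (((n20 x) >>> k) &&& 1)) c : Nat) : Int) := by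
  induction l generalizing c with
  | nil => rfl
  | cons k rest ih =>
    simp only [List.map_cons, List.foldl_cons]
    rw [aStep_nat x c k (hl k (by simp))]
    exact ih (fun i hi => hl i (by simp [hi])) _

theorem foldB_bridge (x : Int) (l : List Nat) (hl : ∀ s ∈ l, s + 4 ≤ 20) (c : Nat) :
    l.foldl (bStep x) (c : Int)
      = ((l.foldl (fun c s => stepBN c (((n20 x) >>> s) &&& 15)) c : Nat) : Int) := by
  induction l generalizing c with
  | nil => rfl
  | cons s rest ih =>
    simp only [List.foldl_cons]
    rw [bStep_nat x c s (hl s (by simp))]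
    exact ih (fun i hi => hl i (by simp [hi])) _

-- ---- Nat-level CRC equivalence ----

theorem maskStep' (c c' b : Nat) (h : c % 2048 = c' % 2048) :
    stepAN c b % 2048 = stepAN c' b % 2048 := by
  unfold stepAN
  dsimp only
  have hmsb : (c >>> 10) &&& 1 = (c' >>> 10) &&& 1 := by
    rw [Nat.shiftRight_eq_div_pow, Nat.shiftRight_eq_div_pow, Nat.and_one_is_mod, Nat.and_one_is_mod]
    norm_num
    omega
  rw [hmsb]
  have hsl : (c <<< 1) % 2048 = (c' <<< 1) % 2048 := by
    rw [Nat.shiftLeft_eq, Nat.shiftLeft_eq]; norm_num; omega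
  by_cases hc : b ^^^ ((c' >>> 10) &&& 1) ≠ 0
  · rw [if_pos hc, if_pos hc]
    rw [show (2048:Nat) = 2 ^ 11 from rfl] at hsl ⊢
    rw [Nat.xor_mod_two_pow, Nat.xor_mod_two_pow, hsl]
  · rw [if_neg hc, if_neg hc]; exact hsl

theorem maskFour (c t : Nat) : fourN c t % 2048 = fourN (c % 2048) t % 2048 := by
  unfold fourN
  exact maskStep' _ _ _ (maskStep' _ _ _ (maskStep' _ _ _ (maskStep' _ _ _ (by omega))))

set_option maxRecDepth 100000 in
set_option maxHeartbeats 4000000 in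
theorem fourN_table : ∀ c < 2048, ∀ t < 16, fourN c t % 2048 = stepBN c t := by decide

theorem groupG (c t : Nat) (ht : t < 16) : fourN c t % 2048 = stepBN (c % 2048) t := by
  rw [maskFour]
  exact fourN_table (c % 2048) (Nat.mod_lt _ (by norm_num)) t ht

theorem nib_bit (n s j v : Nat) (hj : j < 4) (hv : s + j = v) :
    (n >>> v) &&& 1 = (((n >>> s) &&& 15) >>> j) &&& 1 := by
  subst hv
  have h15 : (n >>> s) &&& 15 = (n >>> s) % 16 := by
    have := Nat.and_two_pow_sub_one_eq_mod (n >>> s) 4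
    norm_num at this; exact this
  rw [h15, Nat.and_one_is_mod, Nat.and_one_is_mod, Nat.shiftRight_eq_div_pow,
    Nat.shiftRight_eq_div_pow, Nat.shiftRight_eq_div_pow, pow_add, ← Nat.div_div_eq_div_mul]
  generalize n / 2 ^ s = a
  interval_cases j <;> norm_num <;> omega

theorem nib_lt (a : Nat) : a &&& 15 < 16 := by
  have := Nat.and_le_right (n := a) (m := 15); omega

theorem mainN (n : Nat) :
    (([19,18,17,16,15,14,13,12,11,10,9,8,7,6,5,4,3,2,1,0] : List Nat).foldl
        (fun c k => stepAN c ((n >>> k) &&& 1)) 26) &&& 2047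
      = ([16,12,8,4,0] : List Nat).foldl (fun c s => stepBN c ((n >>> s) &&& 15)) 26 := by
  simp only [List.foldl]
  rw [nib_bit n 16 3 19 (by omega) (by omega), nib_bit n 16 2 18 (by omega) (by omega),
      nib_bit n 16 1 17 (by omega) (by omega), nib_bit n 16 0 16 (by omega) (by omega),
      nib_bit n 12 3 15 (by omega) (by omega), nib_bit n 12 2 14 (by omega) (by omega),
      nib_bit n 12 1 13 (by omega) (by omega), nib_bit n 12 0 12 (by omega) (by omega),
      nib_bit n 8 3 11 (by omega) (by omega), nib_bit n 8 2 10 (by omega) (by omega),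
      nib_bit n 8 1 9 (by omega) (by omega), nib_bit n 8 0 8 (by omega) (by omega),
      nib_bit n 4 3 7 (by omega) (by omega), nib_bit n 4 2 6 (by omega) (by omega),
      nib_bit n 4 1 5 (by omega) (by omega), nib_bit n 4 0 4 (by omega) (by omega),
      nib_bit n 0 3 3 (by omega) (by omega), nib_bit n 0 2 2 (by omega) (by omega),
      nib_bit n 0 1 1 (by omega) (by omega), nib_bit n 0 0 0 (by omega) (by omega)]
  show fourN (fourN (fourN (fourN (fourN 26 ((n >>> 16) &&& 15)) ((n >>> 12) &&& 15)) ((n >>> 8) &&& 15))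
      ((n >>> 4) &&& 15)) ((n >>> 0) &&& 15) &&& 2047 = _
  have hmask : ∀ a : Nat, a &&& 2047 = a % 2048 := by
    intro a; have := Nat.and_two_pow_sub_one_eq_mod a 11; norm_num at this; exact this
  rw [hmask]
  rw [groupG _ _ (nib_lt _), groupG _ _ (nib_lt _), groupG _ _ (nib_lt _), groupG _ _ (nib_lt _),
    groupG _ _ (nib_lt _)]

theorem pyRange_down : PySem.List.pyRange 19 (-1) (-1)
    = ([19,18,17,16,15,14,13,12,11,10,9,8,7,6,5,4,3,2,1,0] : List Nat).map (fun k : Nat => (k : Int)) := by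
  decide

-- ===== VERDICT (by name: the statement is the Claim_ definition above) =====
theorem calculate_flexray_header_crc_spec : Claim_equal_calculate_flexray_header_crc := by
  intro frame _ hpre
  unfold Spec_calculate_flexray_header_crc
  obtain ⟨h1, h2, h3⟩ := hpre
  rw [PySem.Dict.contains_eq_isSome_get?] at h1 h2 h3
  obtain ⟨ind, hind⟩ := Option.isSome_iff_exists.mp h1
  obtain ⟨fid, hfid⟩ := Option.isSome_iff_exists.mp h2
  obtain ⟨plw, hplw⟩ := Option.isSome_iff_exists.mp h3
  unfold calculate_flexray_header_crc calculate_flexray_header_crc_alt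
  simp only [hind, hfid, hplw]
  rw [PySem.Int.bor_comm 0 _, PySem.Int.bor_zero]
  set x := PySem.Int.bor (PySem.Int.bor (ind <<< (19:Nat)) (fid <<< (7:Nat))) plw with hx
  rw [pyRange_down,
    show (26:Int) = ((26:Nat):Int) from rfl,
    foldA_bridge x _ (by decide) 26, foldB_bridge x _ (by decide) 26,
    show (2047:Int) = ((2047:Nat):Int) from rfl, PySem.Int.band_natCast]
  exact_mod_cast mainN (n20 x)
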